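-- pv_equiv track=rewrite | github.com/peytontolbert/agent_kernel | agent_kernel/research_library/context.py | _applied_guidance_lines
-- ===== SOURCE A (Python) =====
-- def _applied_guidance_lines(facts: list[str]) -> list[str]:
--     lines: list[str] = []
--     seen: set[str] = set()
--
--     def add(line: str) -> None:
--         normalized = str(line).strip()
--         if normalized and normalized not in seen:
--             seen.add(normalized)
--             lines.append(normalized)
--
--     for fact in facts:
--         normalized_fact = str(fact).strip()
--         if not normalized_fact:
--             continue
--         if normalized_fact.startswith("rewrite_at_position="):
--             add("rewrite_start=p-len(alpha)")
--             add("rewrite_output=u1+beta+u2")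
--             add(
--                 "replacement_start(alpha, p): start = p - len(alpha); "
--                 "if start < 0 then raise ValueError; otherwise return start"
--             )
--             add("invalid rewrite position: do not clamp start to 0; negative start is an error")
--             add(
--                 "rewrite_at_position(word, alpha, beta, p): start = p - len(alpha); "
--                 "if start < 0 or word[start:p] != alpha then raise ValueError; "
--                 "otherwise return word[:start] + beta + word[p:]"
--             )
--             continue
--         if normalized_fact.startswith("active_letter="):
--             add("active_index_from_p=p-1")
--             add("active_letter_index(word, p): p names the paper's p-th letter in u; zero-based active_index = p - 1")
--             continue
--         if normalized_fact.startswith("greedy_derivation="):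
--             add("greedy_components=leftmost,pure,eager")
--             add("greedy_derivation_components: leftmost, pure, eager")
--             continue
--         if normalized_fact.startswith("left_action="):
--             add("left_action=symbols insert or erase another symbol to their left while remaining unchanged")
--             add("left_action_rule: symbols insert or erase another symbol to their left while remaining unchanged")
--             continue
--         if normalized_fact.startswith("farad_table3="):
--             add(
--                 "farad_table3: ten_pf_group=400; ten_to_100_pf_stepup=40; "
--                 "hundred_to_1000_pf_stepup=100; new_traceability_chain=64; rss=419"
--             )
--             continue
--         if normalized_fact.startswith("cow_grouping="):
--             add("cow_grouping: group adjacent cows into clusters")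
--             continue
--         if normalized_fact.startswith("target_delegation="):
--             add("target_delegation: the leader assigns targets to each herder including itself")
--             continue
--         if normalized_fact.startswith("fence_timing="):
--             add("fence_timing: the leader opens or coordinates the fence when cows are fleeing the right way")
--             continue
--         add(normalized_fact)
--     return lines
-- ===== SOURCE B (Python) =====
-- _PREFIX_LINES = [
--     ("rewrite_at_position=", (
--         "rewrite_start=p-len(alpha)",
--         "rewrite_output=u1+beta+u2",
--         "replacement_start(alpha, p): start = p - len(alpha); "
--         "if start < 0 then raise ValueError; otherwise return start",
--         "invalid rewrite position: do not clamp start to 0; negative start is an error",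
--         "rewrite_at_position(word, alpha, beta, p): start = p - len(alpha); "
--         "if start < 0 or word[start:p] != alpha then raise ValueError; "
--         "otherwise return word[:start] + beta + word[p:]",
--     )),
--     ("active_letter=", (
--         "active_index_from_p=p-1",
--         "active_letter_index(word, p): p names the paper's p-th letter in u; zero-based active_index = p - 1",
--     )),
--     ("greedy_derivation=", (
--         "greedy_components=leftmost,pure,eager",
--         "greedy_derivation_components: leftmost, pure, eager",
--     )),
--     ("left_action=", (
--         "left_action=symbols insert or erase another symbol to their left while remaining unchanged",
--         "left_action_rule: symbols insert or erase another symbol to their left while remaining unchanged",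
--     )),
--     ("farad_table3=", (
--         "farad_table3: ten_pf_group=400; ten_to_100_pf_stepup=40; "
--         "hundred_to_1000_pf_stepup=100; new_traceability_chain=64; rss=419",
--     )),
--     ("cow_grouping=", ("cow_grouping: group adjacent cows into clusters",)),
--     ("target_delegation=", ("target_delegation: the leader assigns targets to each herder including itself",)),
--     ("fence_timing=", ("fence_timing: the leader opens or coordinates the fence when cows are fleeing the right way",)),
-- ]
--
--
-- def _applied_guidance_lines(facts: list[str]) -> list[str]:
--     # Pass 1: dispatch each fact through the prefix table to a flat candidate list.
--     candidates: list[str] = []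
--     for fact in facts:
--         stripped = str(fact).strip()
--         if not stripped:
--             continue
--         for prefix, const_lines in _PREFIX_LINES:
--             if stripped.startswith(prefix):
--                 candidates.extend(const_lines)
--                 break
--         else:
--             candidates.append(stripped)
--     # Pass 2: normalize, drop empties, keep first occurrences.
--     result: list[str] = []
--     seen: set[str] = set()
--     for line in candidates:
--         normalized = line.strip()
--         if normalized and normalized not in seen:
--             seen.add(normalized)
--             result.append(normalized)
--     return result
-- ===== Notes on version B (the rewrite author's own statement) =====
-- stated objective: simpler
-- what changed: A's inline nine-branch if-chain with an add-closure mutating lines/seen is replaced by a data-driven prefix->lines table consulted in one dispatch pass that builds a flat candidate list, followed by a separate normalize-and-dedup pass.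
import Mathlib
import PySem

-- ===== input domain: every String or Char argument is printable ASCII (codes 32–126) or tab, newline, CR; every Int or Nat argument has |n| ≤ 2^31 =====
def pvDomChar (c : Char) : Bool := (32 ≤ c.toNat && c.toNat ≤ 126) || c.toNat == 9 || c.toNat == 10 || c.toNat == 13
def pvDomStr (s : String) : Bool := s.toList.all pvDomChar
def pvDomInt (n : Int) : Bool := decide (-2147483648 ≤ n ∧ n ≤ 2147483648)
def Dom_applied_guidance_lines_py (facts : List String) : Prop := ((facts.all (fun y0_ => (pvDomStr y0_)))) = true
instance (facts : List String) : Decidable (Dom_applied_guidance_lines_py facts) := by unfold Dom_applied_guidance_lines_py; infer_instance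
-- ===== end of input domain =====

-- B replaces A's inline if-chain + add-closure by a prefix→lines table, one dispatch pass
-- building a flat candidate list, then a single normalize-and-dedup pass (objective: simpler).

-- ===== PORT A =====
-- A's inner `add` closure: strip, skip empty, skip seen, else append and mark seen.
def pvAdd (st : List String × PySem.Set String) (line : String) : List String × PySem.Set String :=
  let normalized := PySem.Str.strip line
  if normalized ≠ "" ∧ ¬ (PySem.Set.contains st.2 normalized = true) then
    (st.1 ++ [normalized], PySem.Set.add st.2 normalized)
  else st

-- A's loop body (one iteration of `for fact in facts`).
def pvStepA (st : List String × PySem.Set String) (fact : String) : List String × PySem.Set String :=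
  let normalized_fact := PySem.Str.strip fact
  if normalized_fact = "" then st
  else if PySem.Str.startswith normalized_fact "rewrite_at_position=" then
    pvAdd (pvAdd (pvAdd (pvAdd (pvAdd st
      "rewrite_start=p-len(alpha)")
      "rewrite_output=u1+beta+u2")
      "replacement_start(alpha, p): start = p - len(alpha); if start < 0 then raise ValueError; otherwise return start")
      "invalid rewrite position: do not clamp start to 0; negative start is an error")
      "rewrite_at_position(word, alpha, beta, p): start = p - len(alpha); if start < 0 or word[start:p] != alpha then raise ValueError; otherwise return word[:start] + beta + word[p:]"
  else if PySem.Str.startswith normalized_fact "active_letter=" then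
    pvAdd (pvAdd st
      "active_index_from_p=p-1")
      "active_letter_index(word, p): p names the paper's p-th letter in u; zero-based active_index = p - 1"
  else if PySem.Str.startswith normalized_fact "greedy_derivation=" then
    pvAdd (pvAdd st
      "greedy_components=leftmost,pure,eager")
      "greedy_derivation_components: leftmost, pure, eager"
  else if PySem.Str.startswith normalized_fact "left_action=" then
    pvAdd (pvAdd st
      "left_action=symbols insert or erase another symbol to their left while remaining unchanged")
      "left_action_rule: symbols insert or erase another symbol to their left while remaining unchanged"
  else if PySem.Str.startswith normalized_fact "farad_table3=" then
    pvAdd st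
      "farad_table3: ten_pf_group=400; ten_to_100_pf_stepup=40; hundred_to_1000_pf_stepup=100; new_traceability_chain=64; rss=419"
  else if PySem.Str.startswith normalized_fact "cow_grouping=" then
    pvAdd st "cow_grouping: group adjacent cows into clusters"
  else if PySem.Str.startswith normalized_fact "target_delegation=" then
    pvAdd st "target_delegation: the leader assigns targets to each herder including itself"
  else if PySem.Str.startswith normalized_fact "fence_timing=" then
    pvAdd st "fence_timing: the leader opens or coordinates the fence when cows are fleeing the right way"
  else pvAdd st normalized_fact

def applied_guidance_lines_py (facts : List String) : List String :=
  (facts.foldl pvStepA ([], PySem.Set.empty)).1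

-- ===== PORT B =====
-- B's module-level prefix table (tuples become lists).
def pvPrefixLines : List (String × List String) :=
  [ ("rewrite_at_position=",
      [ "rewrite_start=p-len(alpha)",
        "rewrite_output=u1+beta+u2",
        "replacement_start(alpha, p): start = p - len(alpha); if start < 0 then raise ValueError; otherwise return start",
        "invalid rewrite position: do not clamp start to 0; negative start is an error",
        "rewrite_at_position(word, alpha, beta, p): start = p - len(alpha); if start < 0 or word[start:p] != alpha then raise ValueError; otherwise return word[:start] + beta + word[p:]" ]),
    ("active_letter=",
      [ "active_index_from_p=p-1",
        "active_letter_index(word, p): p names the paper's p-th letter in u; zero-based active_index = p - 1" ]),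
    ("greedy_derivation=",
      [ "greedy_components=leftmost,pure,eager",
        "greedy_derivation_components: leftmost, pure, eager" ]),
    ("left_action=",
      [ "left_action=symbols insert or erase another symbol to their left while remaining unchanged",
        "left_action_rule: symbols insert or erase another symbol to their left while remaining unchanged" ]),
    ("farad_table3=",
      [ "farad_table3: ten_pf_group=400; ten_to_100_pf_stepup=40; hundred_to_1000_pf_stepup=100; new_traceability_chain=64; rss=419" ]),
    ("cow_grouping=", [ "cow_grouping: group adjacent cows into clusters" ]),
    ("target_delegation=", [ "target_delegation: the leader assigns targets to each herder including itself" ]),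
    ("fence_timing=", [ "fence_timing: the leader opens or coordinates the fence when cows are fleeing the right way" ]) ]

-- Pass 1 body: dispatch one fact through the table (first matching prefix, else the stripped fact).
def pvDispatch (acc : List String) (fact : String) : List String :=
  let stripped := PySem.Str.strip fact
  if stripped = "" then acc
  else match pvPrefixLines.find? (fun pr => PySem.Str.startswith stripped pr.1) with
    | some pr => acc ++ pr.2
    | none => acc ++ [stripped]

def pvCandidates (facts : List String) : List String :=
  facts.foldl pvDispatch []

-- Pass 2 body: normalize, drop empties, keep first occurrences.
def pvDedupStep (st : List String × PySem.Set String) (line : String) : List String × PySem.Set String :=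
  let normalized := PySem.Str.strip line
  if normalized ≠ "" ∧ ¬ (PySem.Set.contains st.2 normalized = true) then
    (st.1 ++ [normalized], PySem.Set.add st.2 normalized)
  else st

def applied_guidance_lines_py_alt (facts : List String) : List String :=
  ((pvCandidates facts).foldl pvDedupStep ([], PySem.Set.empty)).1

-- ===== PRECONDITION & SPEC =====
def Spec_applied_guidance_lines_py (facts : List String) (out : List String) : Prop := out = applied_guidance_lines_py_alt facts
instance (facts : List String) (out : List String) : Decidable (Spec_applied_guidance_lines_py facts out) := by unfold Spec_applied_guidance_lines_py; infer_instance

-- ===== CLAIM (what is proved, stated in full; the proofs are below) =====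
def Claim_equal_applied_guidance_lines_py : Prop := ∀ (facts : List String), Dom_applied_guidance_lines_py facts → Spec_applied_guidance_lines_py facts (applied_guidance_lines_py facts)

-- ===== LEMMAS AND PROOFS =====

-- The candidate chunk one fact contributes (proof vocabulary; equals pvDispatch's growth).
def pvChunk (fact : String) : List String :=
  let stripped := PySem.Str.strip fact
  if stripped = "" then []
  else match pvPrefixLines.find? (fun pr => PySem.Str.startswith stripped pr.1) with
    | some pr => pr.2
    | none => [stripped]

-- A's per-fact step equals folding B's dedup step over that fact's candidate chunk.
set_option maxHeartbeats 4000000 in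
set_option maxRecDepth 4000 in
theorem pv_step_eq (st : List String × PySem.Set String) (fact : String) :
    pvStepA st fact = List.foldl pvDedupStep st (pvChunk fact) := by
  unfold pvStepA pvChunk
  by_cases h0 : PySem.Str.strip fact = ""
  · simp only [h0, if_true]; rfl
  · simp only [h0, if_false, pvPrefixLines, List.find?_cons, List.find?_nil]
    repeat' split
    all_goals simp_all
    all_goals first
      | rfl
      | (rename_i heq; subst heq; rfl)

-- One dispatch step appends that fact's chunk to the accumulator.
theorem pv_dispatch_eq (acc : List String) (fact : String) :
    pvDispatch acc fact = acc ++ pvChunk fact := by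
  unfold pvDispatch pvChunk
  by_cases h0 : PySem.Str.strip fact = ""
  · simp [h0]
  · simp only [h0, if_false]
    split <;> simp

-- The dispatch fold's accumulator commutes out as a prefix.
theorem pv_candidates_acc (facts : List String) (acc : List String) :
    facts.foldl pvDispatch acc = acc ++ facts.foldl pvDispatch [] := by
  induction facts generalizing acc with
  | nil => simp
  | cons f fs ih =>
      simp only [List.foldl_cons]
      rw [pv_dispatch_eq, pv_dispatch_eq, ih, ih (([] : List String) ++ pvChunk f)]
      simp [List.append_assoc]

-- Loop invariant: A's fold from any state equals B's dedup fold over the candidate list.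
theorem pv_main (facts : List String) (st : List String × PySem.Set String) :
    facts.foldl pvStepA st = List.foldl pvDedupStep st (pvCandidates facts) := by
  induction facts generalizing st with
  | nil => rfl
  | cons f fs ih =>
      simp only [List.foldl_cons, pvCandidates]
      rw [pv_candidates_acc, pv_dispatch_eq, List.nil_append, List.foldl_append,
        ← pv_step_eq, ih]
      rfl

-- ===== VERDICT (by name: the statement is the Claim_ definition above) =====
theorem applied_guidance_lines_py_spec : Claim_equal_applied_guidance_lines_py := by
  intro facts _
  unfold Spec_applied_guidance_lines_py applied_guidance_lines_py applied_guidance_lines_py_alt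
  rw [pv_main]
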